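-- pv_equiv track=rewrite | github.com/b00kkk/algorithm | Programmers/2025_10/1025_최고의_집합.py | solution
-- ===== SOURCE A (Python) =====
-- def solution(n, s):
--     if n>s:
--         return [-1]
--     answer = []
--     num=s//n
--     for _ in range(n):
--         answer.append(num)
--     if num*n!= s:
--         minus=s-(num*n)
--         for i in range(minus):
--             answer[-i]+=1
--     answer.sort()
--
--
--     return answer
-- ===== SOURCE B (Python) =====
-- def solution(n, s):
--     if n > s:
--         return [-1]
--     q, r = divmod(s, n)
--     return [q] * (n - r) + [q + 1] * r
-- ===== Notes on version B (the rewrite author's own statement) =====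
-- stated objective: simpler
-- what changed: Replaced A's append loop, negative-index increment loop and final sort with a single closed-form divmod expression returning [q]*(n-r)+[q+1]*r, which is already sorted.
import Mathlib
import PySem

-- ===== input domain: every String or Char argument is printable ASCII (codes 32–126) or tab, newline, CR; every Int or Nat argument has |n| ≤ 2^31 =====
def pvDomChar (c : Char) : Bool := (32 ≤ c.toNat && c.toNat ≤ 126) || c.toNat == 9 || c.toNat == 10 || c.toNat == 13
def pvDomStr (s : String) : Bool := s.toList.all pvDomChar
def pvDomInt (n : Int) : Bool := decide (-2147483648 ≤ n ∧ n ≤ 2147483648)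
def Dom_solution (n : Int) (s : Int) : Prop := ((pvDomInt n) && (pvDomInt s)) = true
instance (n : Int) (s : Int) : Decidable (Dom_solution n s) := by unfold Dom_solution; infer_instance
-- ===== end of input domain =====

-- B replaces A's fill loop, negative-index increment loop and sort by the closed form [q]*(n-r)+[q+1]*r (objective: simpler).

-- ===== PORT A =====
def solution (n : Int) (s : Int) : List Int :=
  if n > s then [-1]
  else
    let num := PySem.Int.floordiv s n
    let answer := (PySem.List.pyRange 0 n 1).foldl (fun acc _ => acc ++ [num]) []
    let answer :=
      if num * n ≠ s then
        let minus := s - num * n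
        (PySem.List.pyRange 0 minus 1).foldl
          (fun acc i => PySem.List.pySetD acc (-i) (PySem.List.pyGetD acc (-i) 0 + 1)) answer
      else answer
    PySem.List.sorted answer (fun x => x) false

-- ===== PORT B =====
def solution_alt (n : Int) (s : Int) : List Int :=
  if n > s then [-1]
  else
    let q := PySem.Int.floordiv s n
    let r := PySem.Int.mod s n
    List.replicate (n - r).toNat q ++ List.replicate r.toNat (q + 1)

-- ===== PRECONDITION & SPEC =====
-- Pre_ excludes exactly the inputs where A raises ZeroDivisionError: n = 0 with s ≥ 0
-- (for n = 0, s < 0 the 'n > s' guard returns [-1] before the division).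
def Pre_solution (n : Int) (s : Int) : Prop := n ≠ 0 ∨ s < 0
instance (n : Int) (s : Int) : Decidable (Pre_solution n s) := by unfold Pre_solution; infer_instance
def pvWitness_solution : Int × Int := (3, 7)
def Spec_solution (n : Int) (s : Int) (out : List Int) : Prop := out = solution_alt n s
instance (n : Int) (s : Int) (out : List Int) : Decidable (Spec_solution n s out) := by unfold Spec_solution; infer_instance

-- ===== CLAIM (what is proved, stated in full; the proofs are below) =====
def Claim_equal_solution : Prop := ∀ (n : Int) (s : Int), Dom_solution n s → Pre_solution n s → Spec_solution n s (solution n s)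

-- ===== LEMMAS AND PROOFS =====

-- the fill loop builds a replicate
lemma fill_loop (num : Int) (l : List Int) (init : List Int) :
    l.foldl (fun acc _ => acc ++ [num]) init = init ++ List.replicate l.length num := by
  induction l generalizing init with
  | nil => simp
  | cons x xs ih => simp [List.foldl, ih, List.replicate_succ, List.append_assoc]

lemma pySetD_neg_natCast {α : Type} (xs : List α) (k : Nat) (v : α)
    (h1 : 0 < k) (h2 : k ≤ xs.length) :
    PySem.List.pySetD xs (-(k : Int)) v = xs.set (xs.length - k) v := by
  simp only [PySem.List.pySetD, PySem.List.pySet?, PySem.List.pyIdx?]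
  have hk0 : ¬ (0 : Int) ≤ -(k : Int) := by omega
  have hk1 : -(xs.length : Int) ≤ -(k : Int) := by omega
  have hkne : k ≠ 0 := by omega
  simp [hk0, hk1, hkne]

lemma rep_pairwise (k : Nat) (a : Int) : (List.replicate k a).Pairwise (· ≤ ·) := by
  induction k with
  | zero => simp
  | succ k ih =>
    rw [List.replicate_succ, List.pairwise_cons]
    exact ⟨fun b hb => le_of_eq (List.eq_of_mem_replicate hb).symm, ih⟩

lemma two_rep_pairwise (a b : Nat) (q : Int) :
    (List.replicate a q ++ List.replicate b (q + 1)).Pairwise (· ≤ ·) := by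
  refine List.pairwise_append.mpr ⟨rep_pairwise a q, rep_pairwise b (q+1), ?_⟩
  intro x hx y hy
  rw [List.eq_of_mem_replicate hx, List.eq_of_mem_replicate hy]; omega

lemma get_mid (a b : Nat) (q x : Int) (j : Nat) (hj1 : 1 ≤ j) (hj2 : j ≤ a)
    (h : j < (x :: (List.replicate a q ++ List.replicate b x)).length) :
    (x :: (List.replicate a q ++ List.replicate b x))[j] = q := by
  rcases j with _ | j
  · omega
  · rw [List.getElem_cons_succ, List.getElem_append_left (by simp; omega),
        List.getElem_replicate]

lemma inc_loop (q : Int) (N : Nat) (m : Nat) (h1 : 1 ≤ m) (h2 : m < N) :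
    (PySem.List.pyRange 0 (m : Int) 1).foldl
      (fun acc i => PySem.List.pySetD acc (-i) (PySem.List.pyGetD acc (-i) 0 + 1))
      (List.replicate N q)
    = (q + 1) :: (List.replicate (N - m) q ++ List.replicate (m - 1) (q + 1)) := by
  induction m with
  | zero => omega
  | succ m ih =>
    rcases Nat.eq_or_lt_of_le h1 with h | h
    · -- m + 1 = 1, i.e. m = 0 : one iteration, at index -0 = 0
      have hm : m = 0 := by omega
      subst hm
      have hr : PySem.List.pyRange 0 (((0 + 1 : Nat) : Int)) 1 = [0] := by decide
      have hN : List.replicate N q = q :: List.replicate (N - 1) q := by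
        cases N with
        | zero => omega
        | succ k => simp [List.replicate_succ]
      rw [hr]
      simp only [List.foldl_cons, List.foldl_nil, neg_zero]
      rw [hN]
      simp [PySem.List.pyGetD_zero, PySem.List.pySetD, PySem.List.pySet?, PySem.List.pyIdx?]
    · -- m ≥ 1
      have hm1 : 1 ≤ m := by omega
      have hmN : m < N := by omega
      have hcast : ((m + 1 : Nat) : Int) = (m : Int) + 1 := by push_cast; ring
      rw [hcast, PySem.List.pyRange_one_succ_right (by positivity), List.foldl_append,
          ih hm1 hmN]
      simp only [List.foldl_cons, List.foldl_nil]
      set S : List Int := (q + 1) :: (List.replicate (N - m) q ++ List.replicate (m - 1) (q + 1)) with hS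
      have hlen : S.length = N := by simp [hS]; omega
      have hget : PySem.List.pyGetD S (-(m : Int)) 0 = q := by
        rw [PySem.List.pyGetD_neg_natCast S m 0 (by omega) (by omega)]
        exact get_mid (N - m) (m - 1) q (q + 1) (S.length - m)
          (by rw [hlen]; try omega) (by rw [hlen]; try omega) (by simp [hS]; try omega)
      have hset : PySem.List.pySetD S (-(m : Int)) (q + 1)
          = (q + 1) :: (List.replicate (N - (m + 1)) q ++ List.replicate m (q + 1)) := by
        rw [pySetD_neg_natCast S m (q + 1) (by omega) (by omega), hlen,
            List.set_eq_take_append_cons_drop, if_pos (by omega : N - m < S.length)]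
        have htake : S.take (N - m) = (q + 1) :: List.replicate (N - m - 1) q := by
          rw [hS]
          have hidx : N - m = (N - m - 1) + 1 := by omega
          rw [hidx, List.take_succ_cons, List.take_append_of_le_length (by simp; try omega),
              List.take_replicate]
          congr 2
          omega
        have hdrop : S.drop (N - m + 1) = List.replicate (m - 1) (q + 1) := by
          rw [hS, List.drop_succ_cons, List.drop_append_of_le_length (by simp; try omega),
              List.drop_replicate]
          congr 1
          simp
          try omega
        rw [htake, hdrop]
        have hrepm : List.replicate m (q + 1) = (q + 1) :: List.replicate (m - 1) (q + 1) := by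
          cases m with
          | zero => omega
          | succ k => simp [List.replicate_succ]
        have hNm : N - (m + 1) = N - m - 1 := by omega
        rw [hrepm, hNm]
        simp
      rw [hget, hset]
      norm_num

-- ===== VERDICT (by name: the statement is the Claim_ definition above) =====
theorem solution_spec : Claim_equal_solution := by
  intro n s _ hpre
  unfold Spec_solution solution solution_alt
  by_cases hg : n > s
  · simp [hg]
  · simp only [if_neg hg]
    have hns : n ≤ s := by omega
    have hn0 : n ≠ 0 := by
      rcases hpre with h | h
      · exact h
      · intro h0; omega
    set q := PySem.Int.floordiv s n with hq
    set r := PySem.Int.mod s n with hr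
    have hkey : q * n + r = s := PySem.Int.floordiv_mul_add_mod s n
    have hminus : s - q * n = r := by omega
    rcases lt_or_gt_of_ne hn0 with hneg | hpos
    · -- n < 0 : both sides are []
      have hrb := PySem.Int.mod_neg_bounds s hneg
      have hfill : PySem.List.pyRange 0 n 1 = [] := PySem.List.pyRange_one_eq_nil (by omega)
      have hB1 : (n - r).toNat = 0 := by omega
      have hB2 : r.toNat = 0 := by omega
      rw [hfill, hB1, hB2]
      simp only [List.foldl_nil]
      by_cases hz : q * n ≠ s
      · rw [if_pos hz, hminus]
        have : PySem.List.pyRange 0 r 1 = [] := PySem.List.pyRange_one_eq_nil (by omega)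
        rw [this]
        simp [PySem.List.sorted]
      · rw [if_neg hz]
        simp [PySem.List.sorted]
    · -- n > 0
      have hrnn : 0 ≤ r := PySem.Int.mod_nonneg s hpos
      have hrlt : r < n := PySem.Int.mod_lt s hpos
      obtain ⟨N, hN⟩ : ∃ N : Nat, n = (N : Int) := ⟨n.toNat, by omega⟩
      obtain ⟨R, hR⟩ : ∃ R : Nat, r = (R : Int) := ⟨r.toNat, by omega⟩
      have hNR : R < N := by omega
      have hfill : ([] : List Int).append (List.replicate ((PySem.List.pyRange 0 n 1).length) q)
          = List.replicate N q := by
        rw [PySem.List.length_pyRange_one]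
        simp [hN]
      have hfill' : (PySem.List.pyRange 0 n 1).foldl (fun acc _ => acc ++ [q]) []
          = List.replicate N q := by
        rw [fill_loop]; simpa using hfill
      rw [hfill']
      have hBn : (n - r).toNat = N - R := by omega
      have hBr : r.toNat = R := by omega
      rw [hBn, hBr]
      by_cases hz : q * n ≠ s
      · -- r ≠ 0
        have hR0 : r ≠ 0 := by
          intro h0; apply hz; omega
        have hR1 : 1 ≤ R := by omega
        rw [if_pos hz, hminus, hR, inc_loop q N R hR1 hNR]
        apply PySem.List.sorted_id_eq_of_perm_of_pairwise
        · have hrep : List.replicate R (q + 1) = (q + 1) :: List.replicate (R - 1) (q + 1) := by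
            cases R with
            | zero => omega
            | succ k => simp [List.replicate_succ]
          rw [hrep]
          exact List.perm_middle
        · exact two_rep_pairwise (N - R) R q
      · -- r = 0
        rw [if_neg hz]
        have hR0 : R = 0 := by omega
        rw [hR0]
        simp only [Nat.sub_zero, List.replicate_zero, List.append_nil]
        exact PySem.List.sorted_id_eq_of_perm_of_pairwise _ _ (List.Perm.refl _)
          (rep_pairwise N q)
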